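-- pv_equiv track=rewrite | github.com/moskytw/clime | clime/util.py | find_args_count
-- ===== SOURCE A (Python) =====
-- def find_args_count(line):
--     flag = ''
--     buffer = []
--     ret = []
--     for i in line:
--         if i == '-':
--             flag = '-'
--         elif i == ' ':
--             if len(buffer) > 0:
--                 ret.append(''.join(buffer))
--                 buffer = []
--             if flag == '':
--                 break
--             flag = ''
--         if i != ' ' and flag != '-':
--             flag = 'w'
--             buffer.append(i)
--     return ret
-- ===== SOURCE B (Python) =====
-- def find_args_count(line):
--     ret = []
--     parts = line.split(' ')
--     for part in parts[:-1]:  # the last token is never flushed by the scanner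
--         if part == '':
--             break
--         val = part.split('-')[0]
--         if val:
--             ret.append(val)
--     return ret
-- ===== Notes on version B (the rewrite author's own statement) =====
-- stated objective: simpler
-- what changed: Replaces A's character-by-character scanner with mutable flag/buffer state by one split on spaces, then a single pass over all parts but the last taking each part's prefix before its first dash.
import Mathlib
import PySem

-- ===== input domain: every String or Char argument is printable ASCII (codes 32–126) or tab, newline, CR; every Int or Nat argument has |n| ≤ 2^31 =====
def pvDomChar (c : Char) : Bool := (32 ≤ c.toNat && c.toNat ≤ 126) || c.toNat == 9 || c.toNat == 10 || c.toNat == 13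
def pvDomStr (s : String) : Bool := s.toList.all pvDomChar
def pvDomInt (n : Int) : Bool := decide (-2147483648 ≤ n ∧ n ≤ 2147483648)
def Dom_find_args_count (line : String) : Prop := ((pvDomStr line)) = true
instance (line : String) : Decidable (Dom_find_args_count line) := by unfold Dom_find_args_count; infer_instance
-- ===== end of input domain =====

-- B is a simpler reformulation: split the line on spaces once and take each part's prefix
-- before its first dash, instead of A's char-by-char scanner with flag/buffer state.

-- ===== PORT A =====
-- literal port of A's for-loop (flag/buffer/ret state, early `break` = returning ret)
def findArgsCountGoA : List Char → String → List Char → List String → List String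
  | [], _flag, _buffer, ret => ret
  | i :: rest, flag, buffer, ret =>
    -- if i == '-': flag = '-'  (the elif ' ' branch is below)
    let flag := if i = '-' then "-" else flag
    if i = ' ' then
      -- flush buffer if nonempty
      let ret := if buffer.length > 0 then ret ++ [String.ofList buffer] else ret
      if flag = "" then ret            -- break
      else findArgsCountGoA rest "" [] ret
    else
      -- if i != ' ' and flag != '-': flag = 'w'; buffer.append(i)
      if flag ≠ "-" then findArgsCountGoA rest "w" (buffer ++ [i]) ret
      else findArgsCountGoA rest flag buffer ret

def find_args_count (line : String) : List String :=
  findArgsCountGoA line.toList "" [] []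

-- ===== PORT B =====
-- literal port of Source B's loop over parts[:-1] (early `break` = returning ret)
def findArgsCountGoB : List String → List String → List String
  | [], ret => ret
  | p :: rest, ret =>
    if p = "" then ret                 -- break
    else
      -- part.split('-')[0]: split? with nonempty sep is always `some` of a nonempty list
      let val := ((PySem.Str.split? p "-").getD []).headD ""
      findArgsCountGoB rest (if val ≠ "" then ret ++ [val] else ret)

def find_args_count_alt (line : String) : List String :=
  -- line.split(' '): sep " " ≠ "" so split? is always `some`
  let parts := (PySem.Str.split? line " ").getD []
  findArgsCountGoB parts.dropLast []

-- ===== PRECONDITION & SPEC =====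
def Spec_find_args_count (line : String) (out : List String) : Prop := out = find_args_count_alt line
instance (line : String) (out : List String) : Decidable (Spec_find_args_count line out) := by unfold Spec_find_args_count; infer_instance

-- ===== CLAIM (what is proved, stated in full; the proofs are below) =====
def Claim_equal_find_args_count : Prop := ∀ (line : String), Dom_find_args_count line → Spec_find_args_count line (find_args_count line)

-- ===== LEMMAS AND PROOFS =====

-- structural single-char split, proved equal to PySem.Chars.splitOn below
def splitSp (c : Char) : List Char → List (List Char)
  | [] => [[]]
  | d :: rest =>
    if d = c then [] :: splitSp c rest
    else (d :: (splitSp c rest).headD []) :: (splitSp c rest).tail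

lemma splitSp_cons_headD_tail (c : Char) (l : List Char) :
    splitSp c l = (splitSp c l).headD [] :: (splitSp c l).tail := by
  cases l with
  | nil => rfl
  | cons d rest => simp [splitSp]; split <;> simp

lemma splitOn_go_single (c : Char) :
    ∀ (fuel : Nat) (l cur : List Char) (acc : List (List Char)), l.length < fuel →
      PySem.Chars.splitOn.go [c] fuel l cur acc =
        acc.reverse ++ (cur.reverse ++ (splitSp c l).headD []) :: (splitSp c l).tail := by
  intro fuel
  induction fuel with
  | zero => intro l cur acc h; omega
  | succ f ih =>
    intro l cur acc h
    cases l with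
    | nil => simp [PySem.Chars.splitOn.go, splitSp]
    | cons d rest =>
      by_cases hdc : c = d
      · subst hdc
        rw [PySem.Chars.splitOn.go]
        simp only [List.isPrefixOf, BEq.rfl, Bool.true_and, List.isPrefixOf_nil_left, if_true]
        simp only [List.length_nil, List.length_cons, List.drop_succ_cons, List.drop_zero]
        rw [ih rest [] (cur.reverse :: acc) (by simp at h; omega)]
        rw [show splitSp c (c :: rest) = [] :: splitSp c rest from by rw [splitSp]; simp]
        conv_rhs => rw [splitSp_cons_headD_tail c rest]
        simp
      · rw [PySem.Chars.splitOn.go]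
        have hpre : List.isPrefixOf [c] (d :: rest) = false := by
          simp [List.isPrefixOf]; exact hdc
        rw [if_neg (by simp [hpre])]
        rw [ih rest (d :: cur) acc (by simp at h; omega)]
        rw [splitSp, if_neg (fun h' => hdc h'.symm)]
        simp

lemma splitOn_eq_splitSp (c : Char) (s : List Char) :
    PySem.Chars.splitOn s [c] = splitSp c s := by
  rw [PySem.Chars.splitOn, splitOn_go_single c (s.length + 1) s [] [] (by omega)]
  simpa using (splitSp_cons_headD_tail c s).symm

-- splitSp facts
lemma splitSp_no_sep (c : Char) (l : List Char) (h : c ∉ l) : splitSp c l = [l] := by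
  induction l with
  | nil => rfl
  | cons d rest ih =>
    simp only [List.mem_cons, not_or] at h
    rw [splitSp, if_neg (fun h' => h.1 h'.symm), ih h.2]
    simp

lemma splitSp_append (c : Char) (t rest : List Char) (h : c ∉ t) :
    splitSp c (t ++ c :: rest) = t :: splitSp c rest := by
  induction t with
  | nil => simp [splitSp]
  | cons d t' ih =>
    simp only [List.mem_cons, not_or] at h
    rw [List.cons_append, splitSp, if_neg (fun h' => h.1 h'.symm), ih h.2]
    simp

lemma splitSp_headD (c : Char) (l : List Char) :
    (splitSp c l).headD [] = l.takeWhile (· ≠ c) := by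
  induction l with
  | nil => rfl
  | cons d rest ih =>
    by_cases hd : d = c
    · subst hd; simp [splitSp, List.takeWhile]
    · rw [splitSp, if_neg hd]
      simp only [List.headD_cons, List.takeWhile_cons, if_neg hd]
      simpa [hd] using congrArg (d :: ·) ih

lemma splitSp_ne_nil (c : Char) (l : List Char) : splitSp c l ≠ [] := by
  rw [splitSp_cons_headD_tail c l]; simp

-- decomposition of a list at its first occurrence of c
lemma exists_first_sep (c : Char) (cs : List Char) (h : c ∈ cs) :
    ∃ t rest, cs = t ++ c :: rest ∧ c ∉ t := by
  induction cs with
  | nil => cases h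
  | cons d cs' ih =>
    by_cases hd : d = c
    · exact ⟨[], cs', by simp [hd], by simp⟩
    · have : c ∈ cs' := by
        rcases List.mem_cons.mp h with h' | h'
        · exact absurd h'.symm hd
        · exact h'
      obtain ⟨t, rest, heq, hnt⟩ := ih this
      exact ⟨d :: t, rest, by simp [heq], by
        simp only [List.mem_cons, not_or]
        exact ⟨fun h' => hd h'.symm, hnt⟩⟩

-- A never touches ret while no space remains
lemma goA_no_space (cs : List Char) (h : ' ' ∉ cs) :
    ∀ flag buffer ret, findArgsCountGoA cs flag buffer ret = ret := by
  induction cs with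
  | nil => intro _ _ _; rfl
  | cons d rest ih =>
    intro flag buffer ret
    simp only [List.mem_cons, not_or] at h
    rw [findArgsCountGoA]
    simp only [if_neg (fun h' : d = ' ' => h.1 h'.symm)]
    split <;> (try split) <;> exact ih h.2 _ _ _

-- A in dash-state ignores the remainder of the token
lemma goA_dash (t : List Char) (h : ' ' ∉ t) :
    ∀ rest buffer ret, findArgsCountGoA (t ++ ' ' :: rest) "-" buffer ret =
      findArgsCountGoA rest "" []
        (if buffer.length > 0 then ret ++ [String.ofList buffer] else ret) := by
  induction t with
  | nil =>
    intro rest buffer ret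
    rw [List.nil_append]
    conv_lhs => rw [findArgsCountGoA]
    simp only [if_neg (by decide : ¬ (' ' = '-')), if_pos rfl, if_true,
      if_neg (by decide : ¬ (("-" : String) = ""))]
  | cons d t' ih =>
    intro rest buffer ret
    simp only [List.mem_cons, not_or] at h
    rw [List.cons_append, findArgsCountGoA]
    simp only [if_neg (fun h' : d = ' ' => h.1 h'.symm)]
    by_cases hd : d = '-'
    · rw [if_pos hd]
      rw [if_neg (by decide : ¬ ("-" : String) ≠ "-")]
      exact ih h.2 rest buffer ret
    · rw [if_neg hd]
      rw [if_neg (by decide : ¬ ("-" : String) ≠ "-")]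
      exact ih h.2 rest buffer ret

-- A in word-state: the flushed token is buffer ++ (prefix of t before its first dash)
lemma goA_word (t : List Char) (h : ' ' ∉ t) :
    ∀ rest buffer ret, buffer ≠ [] →
      findArgsCountGoA (t ++ ' ' :: rest) "w" buffer ret =
        findArgsCountGoA rest "" []
          (ret ++ [String.ofList (buffer ++ t.takeWhile (· ≠ '-'))]) := by
  induction t with
  | nil =>
    intro rest buffer ret hb
    rw [List.nil_append]
    conv_lhs => rw [findArgsCountGoA]
    simp only [if_neg (by decide : ¬ (' ' = '-')), if_pos rfl, if_true,
      if_neg (by decide : ¬ (("w" : String) = "")),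
      if_pos (by simp [List.length_pos_iff, hb] : buffer.length > 0)]
    simp
  | cons d t' ih =>
    intro rest buffer ret hb
    simp only [List.mem_cons, not_or] at h
    rw [List.cons_append, findArgsCountGoA]
    simp only [if_neg (fun h' : d = ' ' => h.1 h'.symm)]
    by_cases hd : d = '-'
    · subst hd
      rw [if_pos rfl]
      rw [if_neg (by decide : ¬ ("-" : String) ≠ "-")]
      rw [goA_dash t' h.2 rest buffer ret]
      rw [if_pos (by simp [List.length_pos_iff, hb])]
      rw [List.takeWhile_cons]
      simp
    · rw [if_neg hd]
      rw [if_pos (by decide : ("w" : String) ≠ "-")]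
      rw [ih h.2 rest (buffer ++ [d]) ret (by simp)]
      rw [List.takeWhile_cons, if_pos (by simp [hd])]
      simp

-- token-level: one whole nonempty token from the start state
lemma goA_token (d : Char) (t' : List Char) (h : ' ' ∉ d :: t') (rest : List Char)
    (ret : List String) :
    findArgsCountGoA ((d :: t') ++ ' ' :: rest) "" [] ret =
      findArgsCountGoA rest "" []
        (if (d :: t').takeWhile (· ≠ '-') ≠ [] then
          ret ++ [String.ofList ((d :: t').takeWhile (· ≠ '-'))] else ret) := by
  simp only [List.mem_cons, not_or] at h
  rw [List.cons_append, findArgsCountGoA]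
  simp only [if_neg (fun h' : d = ' ' => h.1 h'.symm)]
  by_cases hd : d = '-'
  · subst hd
    rw [if_pos rfl]
    rw [if_neg (by decide : ¬ ("-" : String) ≠ "-")]
    rw [goA_dash t' h.2 rest [] ret]
    rw [List.takeWhile_cons]
    simp
  · rw [if_neg hd]
    rw [if_pos (by decide : ("" : String) ≠ "-")]
    rw [goA_word t' h.2 rest ([] ++ [d]) ret (by simp)]
    rw [List.takeWhile_cons, if_pos (by simp [hd])]
    simp [hd]

-- char-level version of B's loop
def goB' : List (List Char) → List String → List String
  | [], ret => ret
  | p :: rest, ret =>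
    if p = [] then ret
    else goB' rest (if (splitSp '-' p).headD [] ≠ [] then
      ret ++ [String.ofList ((splitSp '-' p).headD [])] else ret)

lemma mk_eq_empty_iff (p : List Char) : String.ofList p = "" ↔ p = [] := by
  constructor
  · intro h
    have h2 : (String.ofList p).toList = ("" : String).toList := by rw [h]
    simpa using h2
  · intro h; rw [h]

lemma map_ofList_toList (l : List String) :
    List.map (String.ofList ∘ String.toList) l = l := by
  induction l with
  | nil => rfl
  | cons x xs ih => simp [Function.comp, String.ofList_toList, ih]

lemma split_dash_val (p : List Char) :
    ((PySem.Str.split? (String.ofList p) "-").getD []).headD "" =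
      String.ofList ((splitSp '-' p).headD []) := by
  have hmap := PySem.Str.split?_map (String.ofList p) "-"
  have hch : PySem.Chars.split? (String.ofList p).toList ("-" : String).toList =
      some (splitSp '-' p) := by
    rw [PySem.Chars.split?]
    simp [splitOn_eq_splitSp]
  rw [hch] at hmap
  cases hsp : PySem.Str.split? (String.ofList p) "-" with
  | none => rw [hsp] at hmap; simp at hmap
  | some l =>
    rw [hsp] at hmap
    simp only [Option.map_some, Option.some.injEq] at hmap
    simp only [Option.getD_some]
    -- l.map toList = splitSp '-' p; headD commutes
    have hmk : l = (splitSp '-' p).map String.ofList := by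
      have h3 := congrArg (List.map String.ofList) hmap
      rw [List.map_map, map_ofList_toList] at h3
      exact h3
    rw [hmk]
    cases splitSp '-' p <;> simp

lemma goB_eq_goB' (ps : List (List Char)) : ∀ ret,
    findArgsCountGoB (ps.map String.ofList) ret = goB' ps ret := by
  induction ps with
  | nil => intro ret; rfl
  | cons p rest ih =>
    intro ret
    rw [List.map_cons]
    by_cases hp : p = []
    · simp only [findArgsCountGoB, goB', if_pos (mk_eq_empty_iff p |>.mpr hp), if_pos hp]
    · simp only [findArgsCountGoB, goB',
        if_neg (fun h' => hp ((mk_eq_empty_iff p).mp h')), if_neg hp]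
      rw [split_dash_val p]
      by_cases hv : (splitSp '-' p).headD [] = []
      · rw [if_neg (by simpa [mk_eq_empty_iff] using hv), if_neg (by simpa using hv)]
        exact ih _
      · rw [if_pos (by simpa [mk_eq_empty_iff] using hv), if_pos (by simpa using hv)]
        exact ih _

-- the main induction: A from the start state = B' on the space-split parts
lemma main_eq : ∀ (n : Nat) (cs : List Char), cs.length ≤ n → ∀ ret,
    findArgsCountGoA cs "" [] ret = goB' (splitSp ' ' cs).dropLast ret := by
  intro n
  induction n with
  | zero =>
    intro cs hlen ret
    have : cs = [] := List.eq_nil_of_length_eq_zero (Nat.le_zero.mp hlen)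
    subst this
    rfl
  | succ n ih =>
    intro cs hlen ret
    by_cases hsp : ' ' ∈ cs
    · obtain ⟨t, rest, heq, hnt⟩ := exists_first_sep ' ' cs hsp
      subst heq
      rw [splitSp_append ' ' t rest hnt]
      rw [List.dropLast_cons_of_ne_nil (splitSp_ne_nil ' ' rest)]
      cases t with
      | nil =>
        -- leading space: A breaks immediately, B sees the empty part and breaks
        rw [List.nil_append, findArgsCountGoA]
        simp [goB']
      | cons d t' =>
        rw [goA_token d t' hnt rest ret]
        rw [goB', if_neg (List.cons_ne_nil d t')]
        rw [splitSp_headD]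
        have hr : rest.length ≤ n := by simp at hlen; omega
        by_cases hv : (d :: t').takeWhile (· ≠ '-') = []
        · rw [if_neg (by simpa using hv)]
          exact ih rest hr _
        · rw [if_pos (by simpa using hv)]
          exact ih rest hr _
    · rw [goA_no_space cs hsp, splitSp_no_sep ' ' cs hsp]
      rfl

-- ===== VERDICT (by name: the statement is the Claim_ definition above) =====
theorem find_args_count_spec : Claim_equal_find_args_count := by
  intro line _
  unfold Spec_find_args_count find_args_count find_args_count_alt
  have hmap := PySem.Str.split?_map line " "
  have hch : PySem.Chars.split? line.toList (" " : String).toList =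
      some (splitSp ' ' line.toList) := by
    rw [PySem.Chars.split?]
    simp [splitOn_eq_splitSp]
  rw [hch] at hmap
  cases hsp : PySem.Str.split? line " " with
  | none => rw [hsp] at hmap; simp at hmap
  | some l =>
    rw [hsp] at hmap
    simp only [Option.map_some, Option.some.injEq] at hmap
    have hl : l = (splitSp ' ' line.toList).map String.ofList := by
      have h3 := congrArg (List.map String.ofList) hmap
      rw [List.map_map, map_ofList_toList] at h3
      exact h3
    simp only [Option.getD_some, hl]
    rw [← List.map_dropLast]
    rw [goB_eq_goB']
    exact main_eq line.toList.length line.toList le_rfl []
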